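-- pv_equiv track=rewrite | github.com/SE-UoM/r-quality-analyzer | r_quality_analyzer/analyzer.py | is_code_line
-- ===== SOURCE A (Python) =====
-- def is_code_line(line: str) -> bool:
--     """Return True if line is a code line (not blank or comment)."""
--     line = line.strip()
--     if not line:
--         return False
--     # Check if line starts with # (comment)
--     if line.startswith("#"):
--         return False
--     # Remove inline comments (everything after # that's not in a string)
--     # Simple approach: find # that's not inside quotes
--     in_single_quote = False
--     in_double_quote = False
--     for i, char in enumerate(line):
--         if char == "'" and (i == 0 or line[i-1] != '\\'):
--             in_single_quote = not in_single_quote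
--         elif char == '"' and (i == 0 or line[i-1] != '\\'):
--             in_double_quote = not in_double_quote
--         elif char == '#' and not in_single_quote and not in_double_quote:
--             line = line[:i].strip()
--             break
--     return bool(line)
-- ===== SOURCE B (Python) =====
-- def is_code_line(line: str) -> bool:
--     """Return True if line is a code line (not blank or comment)."""
--     s = line.strip()
--     return bool(s) and not s.startswith("#")
-- ===== Notes on version B (the rewrite author's own statement) =====
-- stated objective: simpler
-- what changed: Dropped A's whole quote-tracking character scan, which is dead code for the boolean result: once the stripped line is non-empty and does not start with the comment marker, any truncation at an unquoted comment marker still keeps the non-space first character, so A always returns True there; B is just strip + emptiness check + prefix check.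
import Mathlib
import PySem

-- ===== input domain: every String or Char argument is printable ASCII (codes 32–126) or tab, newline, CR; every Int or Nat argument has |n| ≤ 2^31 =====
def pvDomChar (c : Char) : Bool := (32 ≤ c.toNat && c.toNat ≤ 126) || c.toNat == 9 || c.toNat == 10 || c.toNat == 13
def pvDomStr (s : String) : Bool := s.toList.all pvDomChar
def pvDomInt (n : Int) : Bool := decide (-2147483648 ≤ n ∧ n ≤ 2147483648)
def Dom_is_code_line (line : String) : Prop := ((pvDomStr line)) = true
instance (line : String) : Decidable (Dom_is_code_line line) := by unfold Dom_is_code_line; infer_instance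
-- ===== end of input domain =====

-- B drops A's quote-tracking scan (dead code for the boolean result): strip + empty + startswith('#') only.


-- ===== PORT A =====
-- A's character scan: walks the stripped line with quote state; on an unquoted '#'
-- it truncates (line[:i]) and re-strips, else falls through and returns the line.
-- pyGetD's default is never used: the access line[i-1] is guarded by the i = 0 disjunct,
-- and in the loop i is the enumerate index, so 1 ≤ i there keeps i-1 in range.
def pvScanA (cs : List Char) : List Char → Int → Bool → Bool → List Char
  | [], _, _, _ => cs
  | c :: rest, i, sq, dq =>
    if c = '\'' ∧ (i = 0 ∨ PySem.List.pyGetD cs (i - 1) ' ' ≠ '\\') then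
      pvScanA cs rest (i + 1) (!sq) dq
    else if c = '"' ∧ (i = 0 ∨ PySem.List.pyGetD cs (i - 1) ' ' ≠ '\\') then
      pvScanA cs rest (i + 1) sq (!dq)
    else if c = '#' ∧ sq = false ∧ dq = false then
      PySem.Chars.strip (PySem.List.slice cs none (some i))
    else
      pvScanA cs rest (i + 1) sq dq

def is_code_line (line : String) : Bool :=
  let cs := PySem.Chars.strip line.toList
  if cs.isEmpty then false
  else if PySem.Chars.startswith cs ['#'] then false
  else !(pvScanA cs cs 0 false false).isEmpty

-- ===== PORT B =====
def is_code_line_alt (line : String) : Bool :=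
  let s := PySem.Chars.strip line.toList
  !s.isEmpty && !PySem.Chars.startswith s ['#']

-- ===== PRECONDITION & SPEC =====
def Spec_is_code_line (line : String) (out : Bool) : Prop := out = is_code_line_alt line
instance (line : String) (out : Bool) : Decidable (Spec_is_code_line line out) := by unfold Spec_is_code_line; infer_instance

-- ===== CLAIM (what is proved, stated in full; the proofs are below) =====
def Claim_equal_is_code_line : Prop := ∀ (line : String), Dom_is_code_line line → Spec_is_code_line line (is_code_line line)

-- ===== LEMMAS AND PROOFS =====

-- stripping a list whose head is not whitespace yields a non-empty list
theorem pv_strip_cons_ne_nil (c : Char) (l : List Char)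
    (hc : PySem.Chars.isspace c = false) :
    PySem.Chars.strip (c :: l) ≠ [] := by
  simp only [PySem.Chars.strip, PySem.Chars.lstrip, PySem.Chars.rstrip,
    List.dropWhile_cons, hc]
  intro h
  rw [List.reverse_eq_nil_iff, List.dropWhile_eq_nil_iff] at h
  have := h c (by simp)
  simp [hc] at this

-- the head of a stripped list is not whitespace
theorem pv_strip_head_not_space (l : List Char) (c : Char) (t : List Char)
    (h : PySem.Chars.strip l = c :: t) :
    PySem.Chars.isspace c = false := by
  unfold PySem.Chars.strip PySem.Chars.rstrip at h
  have hpre : (c :: t) <+: PySem.Chars.lstrip l := by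
    rw [← h]
    have hs := List.dropWhile_suffix (l := (PySem.Chars.lstrip l).reverse)
      (p := PySem.Chars.isspace)
    exact List.reverse_suffix.mp (by simpa using hs)
  obtain ⟨t', ht'⟩ := hpre
  unfold PySem.Chars.lstrip at ht'
  have hd : List.dropWhile PySem.Chars.isspace l = c :: (t ++ t') := by
    simpa using ht'.symm
  have hne : List.dropWhile PySem.Chars.isspace l ≠ [] := by rw [hd]; simp
  have hw := List.head_dropWhile_not PySem.Chars.isspace hne
  simp only [hd, List.head_cons] at hw
  exact hw

-- A's scan never returns the empty list when the scanned (stripped) line starts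
-- with a non-space, non-'#' character: any truncation keeps that first character.
theorem pv_scan_ne_nil (c : Char) (t : List Char)
    (hc : PySem.Chars.isspace c = false) (hh : c ≠ '#') :
    ∀ (rest : List Char) (i : Int) (sq dq : Bool),
      (1 ≤ i ∨ (rest = c :: t ∧ i = 0)) →
      pvScanA (c :: t) rest i sq dq ≠ [] := by
  intro rest
  induction rest with
  | nil => intro i sq dq _; simp [pvScanA]
  | cons r rs ih =>
    intro i sq dq hi
    have hi' : 1 ≤ i + 1 := by rcases hi with h | ⟨_, h⟩ <;> omega
    unfold pvScanA
    split
    · exact ih (i + 1) (!sq) dq (Or.inl hi')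
    · split
      · exact ih (i + 1) sq (!dq) (Or.inl hi')
      · split
        · -- truncation branch: r = '#', hence i ≥ 1, so line[:i] keeps c
          rename_i h1 h2 h3
          have hi1 : 1 ≤ i := by
            rcases hi with h | ⟨he, h0⟩
            · exact h
            · exfalso; exact hh (by rw [← h3.1]; exact (List.cons.injEq .. ▸ he).1.symm)
          rw [PySem.List.slice_to (c :: t) (show (0:Int) ≤ i by omega)]
          have : (c :: t).take i.toNat = c :: t.take (i.toNat - 1) := by
            have : i.toNat = (i.toNat - 1) + 1 := by omega
            rw [this, List.take_succ_cons]
            simp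
          rw [this]
          exact pv_strip_cons_ne_nil c _ hc
        · exact ih (i + 1) sq dq (Or.inl hi')

-- ===== VERDICT (by name: the statement is the Claim_ definition above) =====
theorem is_code_line_spec : Claim_equal_is_code_line := by
  intro line _
  unfold Spec_is_code_line is_code_line is_code_line_alt
  cases hcs : PySem.Chars.strip line.toList with
  | nil => simp
  | cons c t =>
    by_cases hsh : PySem.Chars.startswith (c :: t) ['#']
    · simp [hsh]
    · have hh : c ≠ '#' := by
        intro h; apply hsh
        simp [PySem.Chars.startswith, List.isPrefixOf, h]
      have hc := pv_strip_head_not_space line.toList c t hcs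
      have hne := pv_scan_ne_nil c t hc hh (c :: t) 0 false false (Or.inr ⟨rfl, rfl⟩)
      simp [hsh, hne]
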